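-- pv_equiv track=rewrite | github.com/herbertskyper/NeuTracer | server/trace_processor/kmem_processor.py | _get_size_range
-- ===== SOURCE A (Python) =====
-- def _get_size_range(size: int) -> str:
--     """根据分配大小返回范围字符串"""
--     ranges = [
--         (0, 16, "0-16B"),
--         (16, 64, "16-64B"),
--         (64, 256, "64-256B"),
--         (256, 1024, "256B-1KB"),
--         (1024, 4096, "1-4KB"),
--         (4096, 16384, "4-16KB"),
--         (16384, 65536, "16-64KB"),
--         (65536, 262144, "64-256KB"),
--         (262144, 1048576, "256KB-1MB"),
--         (1048576, 4194304, "1-4MB"),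
--         (4194304, 16777216, "4-16MB"),
--         (16777216, 67108864, "16-64MB"),
--         (67108864, float('inf'), ">64MB")
--     ]
--
--     for min_size, max_size, range_str in ranges:
--         if min_size <= size < max_size:
--             return range_str
--
--     return "未知大小"
-- ===== SOURCE B (Python) =====
-- _BOUNDS = [0, 16, 64, 256, 1024, 4096, 16384, 65536,
--            262144, 1048576, 4194304, 16777216, 67108864]
-- _LABELS = ["0-16B", "16-64B", "64-256B", "256B-1KB", "1-4KB", "4-16KB",
--            "16-64KB", "64-256KB", "256KB-1MB", "1-4MB", "4-16MB",
--            "16-64MB", ">64MB"]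
--
-- def _get_size_range(size: int) -> str:
--     # binary search for the rightmost boundary <= size (bisect_right - 1)
--     lo, hi = 0, len(_BOUNDS)
--     while lo < hi:
--         mid = (lo + hi) // 2
--         if _BOUNDS[mid] <= size:
--             lo = mid + 1
--         else:
--             hi = mid
--     if lo == 0:
--         return "未知大小"
--     return _LABELS[lo - 1]
-- ===== Notes on version B (the rewrite author's own statement) =====
-- stated objective: alternative
-- what changed: Replaced the linear scan over (min,max,label) range triples with a hand-written bisect_right-style binary search over a sorted boundaries table plus a parallel labels table; negative sizes fall out as index zero.
import Mathlib
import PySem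

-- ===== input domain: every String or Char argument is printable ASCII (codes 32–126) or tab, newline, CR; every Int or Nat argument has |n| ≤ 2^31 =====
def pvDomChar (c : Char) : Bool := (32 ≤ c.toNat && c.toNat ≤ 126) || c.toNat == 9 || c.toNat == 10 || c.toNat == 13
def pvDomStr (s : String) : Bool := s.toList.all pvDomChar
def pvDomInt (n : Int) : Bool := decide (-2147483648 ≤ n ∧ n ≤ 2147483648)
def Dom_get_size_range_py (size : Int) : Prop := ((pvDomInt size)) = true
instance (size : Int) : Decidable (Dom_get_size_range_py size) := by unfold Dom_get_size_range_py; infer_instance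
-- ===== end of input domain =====

-- B replaces A's linear scan over (lo, hi, label) range triples with a hand-written
-- binary search over a sorted boundaries table (objective: alternative).

-- ===== PORT A =====
def pvRanges : List (Int × Option Int × String) :=
  [(0, some 16, "0-16B"),
   (16, some 64, "16-64B"),
   (64, some 256, "64-256B"),
   (256, some 1024, "256B-1KB"),
   (1024, some 4096, "1-4KB"),
   (4096, some 16384, "4-16KB"),
   (16384, some 65536, "16-64KB"),
   (65536, some 262144, "64-256KB"),
   (262144, some 1048576, "256KB-1MB"),
   (1048576, some 4194304, "1-4MB"),
   (4194304, some 16777216, "4-16MB"),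
   (16777216, some 67108864, "16-64MB"),
   (67108864, none, ">64MB")]

-- A's for-loop with early return: first matching range, else fallback; upper bound none = float('inf')
def pvFirstMatch (size : Int) : List (Int × Option Int × String) → String
  | [] => "未知大小"
  | (a, none, s) :: rest => if a ≤ size then s else pvFirstMatch size rest
  | (a, some m, s) :: rest => if a ≤ size ∧ size < m then s else pvFirstMatch size rest

def get_size_range_py (size : Int) : String := pvFirstMatch size pvRanges

-- ===== PORT B =====
def pvBounds : List Int := [0, 16, 64, 256, 1024, 4096, 16384, 65536, 262144, 1048576, 4194304, 16777216, 67108864]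
def pvLabels : List String := ["0-16B", "16-64B", "64-256B", "256B-1KB", "1-4KB", "4-16KB", "16-64KB", "64-256KB", "256KB-1MB", "1-4MB", "4-16MB", "16-64MB", ">64MB"]

-- the while-loop of Source B's binary search, step for step
def pvBS (size : Int) (lo hi : Nat) : Nat :=
  if h : lo < hi then
    let mid := (lo + hi) / 2
    if pvBounds.getD mid 0 ≤ size then pvBS size (mid + 1) hi else pvBS size lo mid
  else lo
termination_by hi - lo
decreasing_by all_goals omega

def get_size_range_py_alt (size : Int) : String :=
  let lo := pvBS size 0 pvBounds.length
  if lo = 0 then "未知大小" else pvLabels.getD (lo - 1) "未知大小"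

-- ===== PRECONDITION & SPEC =====
def Spec_get_size_range_py (size : Int) (out : String) : Prop := out = get_size_range_py_alt size
instance (size : Int) (out : String) : Decidable (Spec_get_size_range_py size out) := by unfold Spec_get_size_range_py; infer_instance

-- ===== CLAIM (what is proved, stated in full; the proofs are below) =====
def Claim_equal_get_size_range_py : Prop := ∀ (size : Int), Dom_get_size_range_py size → Spec_get_size_range_py size (get_size_range_py size)

-- ===== LEMMAS AND PROOFS =====

-- the binary search returns j when the monotone predicate 'bound ≤ size' flips from true to false at index j
theorem pvBS_eq (size : Int) (lo hi j : Nat) (h1 : lo ≤ j) (h2 : j ≤ hi)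
    (hbelow : ∀ i, i < j → lo ≤ i → pvBounds.getD i 0 ≤ size)
    (habove : ∀ i, j ≤ i → i < hi → ¬ pvBounds.getD i 0 ≤ size) :
    pvBS size lo hi = j := by
  generalize hfuel : hi - lo = fuel
  induction fuel using Nat.strong_induction_on generalizing lo hi with
  | _ fuel IH =>
    rw [pvBS]
    split
    · next hlt =>
      by_cases hc : pvBounds.getD ((lo + hi) / 2) 0 ≤ size
      · simp only [hc, if_pos]
        have hj : (lo + hi) / 2 < j := by
          by_contra hle
          exact habove _ (by omega) (by omega) hc
        exact IH (hi - ((lo+hi)/2 + 1)) (by omega) _ _ (by omega) h2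
          (fun i hi1 hi2 => hbelow i hi1 (by omega))
          (fun i hi1 hi2 => habove i hi1 hi2) rfl
      · simp only [hc]
        have hj : j ≤ (lo + hi) / 2 := by
          by_contra hle
          exact hc (hbelow _ (by omega) (by omega))
        exact IH ((lo+hi)/2 - lo) (by omega) _ _ h1 hj
          (fun i hi1 hi2 => hbelow i hi1 hi2)
          (fun i hi1 hi2 => habove i hi1 (by omega)) rfl
    · omega

theorem pv_gs : pvBounds.getD 0 0 = (0:Int) ∧ pvBounds.getD 1 0 = (16:Int) ∧ pvBounds.getD 2 0 = (64:Int) ∧ pvBounds.getD 3 0 = (256:Int) ∧ pvBounds.getD 4 0 = (1024:Int) ∧ pvBounds.getD 5 0 = (4096:Int) ∧ pvBounds.getD 6 0 = (16384:Int) ∧ pvBounds.getD 7 0 = (65536:Int) ∧ pvBounds.getD 8 0 = (262144:Int) ∧ pvBounds.getD 9 0 = (1048576:Int) ∧ pvBounds.getD 10 0 = (4194304:Int) ∧ pvBounds.getD 11 0 = (16777216:Int) ∧ pvBounds.getD 12 0 = (67108864:Int) := by decide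

theorem pv_main : ∀ (size : Int), get_size_range_py size = get_size_range_py_alt size := by
  intro size
  rcases lt_or_ge size 0 with h | h0
  · have hbs : pvBS size 0 13 = 0 := pvBS_eq size 0 13 0 (by omega) (by omega)
        (by intro i hi1 hi2; exact absurd hi1 (by omega))
        (by intro i hi1 hi2; interval_cases i <;> (simp only [pv_gs]; omega))
    simp only [get_size_range_py, pvFirstMatch, pvRanges]
    rw [if_neg (by omega), if_neg (by omega), if_neg (by omega), if_neg (by omega), if_neg (by omega), if_neg (by omega), if_neg (by omega), if_neg (by omega), if_neg (by omega), if_neg (by omega), if_neg (by omega), if_neg (by omega), if_neg (by omega)]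
    simp only [get_size_range_py_alt, show pvBounds.length = 13 from by decide, hbs]
    decide

  rcases lt_or_ge size 16 with h | h1
  · have hbs : pvBS size 0 13 = 1 := pvBS_eq size 0 13 1 (by omega) (by omega)
        (by intro i hi1 hi2; interval_cases i <;> (simp only [pv_gs]; omega))
        (by intro i hi1 hi2; interval_cases i <;> (simp only [pv_gs]; omega))
    simp only [get_size_range_py, pvFirstMatch, pvRanges]
    rw [if_pos (by omega)]
    simp only [get_size_range_py_alt, show pvBounds.length = 13 from by decide, hbs]
    decide

  rcases lt_or_ge size 64 with h | h2
  · have hbs : pvBS size 0 13 = 2 := pvBS_eq size 0 13 2 (by omega) (by omega)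
        (by intro i hi1 hi2; interval_cases i <;> (simp only [pv_gs]; omega))
        (by intro i hi1 hi2; interval_cases i <;> (simp only [pv_gs]; omega))
    simp only [get_size_range_py, pvFirstMatch, pvRanges]
    rw [if_neg (by omega), if_pos (by omega)]
    simp only [get_size_range_py_alt, show pvBounds.length = 13 from by decide, hbs]
    decide

  rcases lt_or_ge size 256 with h | h3
  · have hbs : pvBS size 0 13 = 3 := pvBS_eq size 0 13 3 (by omega) (by omega)
        (by intro i hi1 hi2; interval_cases i <;> (simp only [pv_gs]; omega))
        (by intro i hi1 hi2; interval_cases i <;> (simp only [pv_gs]; omega))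
    simp only [get_size_range_py, pvFirstMatch, pvRanges]
    rw [if_neg (by omega), if_neg (by omega), if_pos (by omega)]
    simp only [get_size_range_py_alt, show pvBounds.length = 13 from by decide, hbs]
    decide

  rcases lt_or_ge size 1024 with h | h4
  · have hbs : pvBS size 0 13 = 4 := pvBS_eq size 0 13 4 (by omega) (by omega)
        (by intro i hi1 hi2; interval_cases i <;> (simp only [pv_gs]; omega))
        (by intro i hi1 hi2; interval_cases i <;> (simp only [pv_gs]; omega))
    simp only [get_size_range_py, pvFirstMatch, pvRanges]
    rw [if_neg (by omega), if_neg (by omega), if_neg (by omega), if_pos (by omega)]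
    simp only [get_size_range_py_alt, show pvBounds.length = 13 from by decide, hbs]
    decide

  rcases lt_or_ge size 4096 with h | h5
  · have hbs : pvBS size 0 13 = 5 := pvBS_eq size 0 13 5 (by omega) (by omega)
        (by intro i hi1 hi2; interval_cases i <;> (simp only [pv_gs]; omega))
        (by intro i hi1 hi2; interval_cases i <;> (simp only [pv_gs]; omega))
    simp only [get_size_range_py, pvFirstMatch, pvRanges]
    rw [if_neg (by omega), if_neg (by omega), if_neg (by omega), if_neg (by omega), if_pos (by omega)]
    simp only [get_size_range_py_alt, show pvBounds.length = 13 from by decide, hbs]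
    decide

  rcases lt_or_ge size 16384 with h | h6
  · have hbs : pvBS size 0 13 = 6 := pvBS_eq size 0 13 6 (by omega) (by omega)
        (by intro i hi1 hi2; interval_cases i <;> (simp only [pv_gs]; omega))
        (by intro i hi1 hi2; interval_cases i <;> (simp only [pv_gs]; omega))
    simp only [get_size_range_py, pvFirstMatch, pvRanges]
    rw [if_neg (by omega), if_neg (by omega), if_neg (by omega), if_neg (by omega), if_neg (by omega), if_pos (by omega)]
    simp only [get_size_range_py_alt, show pvBounds.length = 13 from by decide, hbs]
    decide

  rcases lt_or_ge size 65536 with h | h7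
  · have hbs : pvBS size 0 13 = 7 := pvBS_eq size 0 13 7 (by omega) (by omega)
        (by intro i hi1 hi2; interval_cases i <;> (simp only [pv_gs]; omega))
        (by intro i hi1 hi2; interval_cases i <;> (simp only [pv_gs]; omega))
    simp only [get_size_range_py, pvFirstMatch, pvRanges]
    rw [if_neg (by omega), if_neg (by omega), if_neg (by omega), if_neg (by omega), if_neg (by omega), if_neg (by omega), if_pos (by omega)]
    simp only [get_size_range_py_alt, show pvBounds.length = 13 from by decide, hbs]
    decide

  rcases lt_or_ge size 262144 with h | h8
  · have hbs : pvBS size 0 13 = 8 := pvBS_eq size 0 13 8 (by omega) (by omega)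
        (by intro i hi1 hi2; interval_cases i <;> (simp only [pv_gs]; omega))
        (by intro i hi1 hi2; interval_cases i <;> (simp only [pv_gs]; omega))
    simp only [get_size_range_py, pvFirstMatch, pvRanges]
    rw [if_neg (by omega), if_neg (by omega), if_neg (by omega), if_neg (by omega), if_neg (by omega), if_neg (by omega), if_neg (by omega), if_pos (by omega)]
    simp only [get_size_range_py_alt, show pvBounds.length = 13 from by decide, hbs]
    decide

  rcases lt_or_ge size 1048576 with h | h9
  · have hbs : pvBS size 0 13 = 9 := pvBS_eq size 0 13 9 (by omega) (by omega)
        (by intro i hi1 hi2; interval_cases i <;> (simp only [pv_gs]; omega))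
        (by intro i hi1 hi2; interval_cases i <;> (simp only [pv_gs]; omega))
    simp only [get_size_range_py, pvFirstMatch, pvRanges]
    rw [if_neg (by omega), if_neg (by omega), if_neg (by omega), if_neg (by omega), if_neg (by omega), if_neg (by omega), if_neg (by omega), if_neg (by omega), if_pos (by omega)]
    simp only [get_size_range_py_alt, show pvBounds.length = 13 from by decide, hbs]
    decide

  rcases lt_or_ge size 4194304 with h | h10
  · have hbs : pvBS size 0 13 = 10 := pvBS_eq size 0 13 10 (by omega) (by omega)
        (by intro i hi1 hi2; interval_cases i <;> (simp only [pv_gs]; omega))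
        (by intro i hi1 hi2; interval_cases i <;> (simp only [pv_gs]; omega))
    simp only [get_size_range_py, pvFirstMatch, pvRanges]
    rw [if_neg (by omega), if_neg (by omega), if_neg (by omega), if_neg (by omega), if_neg (by omega), if_neg (by omega), if_neg (by omega), if_neg (by omega), if_neg (by omega), if_pos (by omega)]
    simp only [get_size_range_py_alt, show pvBounds.length = 13 from by decide, hbs]
    decide

  rcases lt_or_ge size 16777216 with h | h11
  · have hbs : pvBS size 0 13 = 11 := pvBS_eq size 0 13 11 (by omega) (by omega)
        (by intro i hi1 hi2; interval_cases i <;> (simp only [pv_gs]; omega))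
        (by intro i hi1 hi2; interval_cases i <;> (simp only [pv_gs]; omega))
    simp only [get_size_range_py, pvFirstMatch, pvRanges]
    rw [if_neg (by omega), if_neg (by omega), if_neg (by omega), if_neg (by omega), if_neg (by omega), if_neg (by omega), if_neg (by omega), if_neg (by omega), if_neg (by omega), if_neg (by omega), if_pos (by omega)]
    simp only [get_size_range_py_alt, show pvBounds.length = 13 from by decide, hbs]
    decide

  rcases lt_or_ge size 67108864 with h | h12
  · have hbs : pvBS size 0 13 = 12 := pvBS_eq size 0 13 12 (by omega) (by omega)
        (by intro i hi1 hi2; interval_cases i <;> (simp only [pv_gs]; omega))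
        (by intro i hi1 hi2; interval_cases i <;> (simp only [pv_gs]; omega))
    simp only [get_size_range_py, pvFirstMatch, pvRanges]
    rw [if_neg (by omega), if_neg (by omega), if_neg (by omega), if_neg (by omega), if_neg (by omega), if_neg (by omega), if_neg (by omega), if_neg (by omega), if_neg (by omega), if_neg (by omega), if_neg (by omega), if_pos (by omega)]
    simp only [get_size_range_py_alt, show pvBounds.length = 13 from by decide, hbs]
    decide

  · have hbs : pvBS size 0 13 = 13 := pvBS_eq size 0 13 13 (by omega) (by omega)
        (by intro i hi1 hi2; interval_cases i <;> (simp only [pv_gs]; omega))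
        (by intro i hi1 hi2; exact absurd hi2 (by omega))
    simp only [get_size_range_py, pvFirstMatch, pvRanges]
    rw [if_neg (by omega), if_neg (by omega), if_neg (by omega), if_neg (by omega), if_neg (by omega), if_neg (by omega), if_neg (by omega), if_neg (by omega), if_neg (by omega), if_neg (by omega), if_neg (by omega), if_neg (by omega), if_pos (by omega)]
    simp only [get_size_range_py_alt, show pvBounds.length = 13 from by decide, hbs]
    decide

-- ===== VERDICT (by name: the statement is the Claim_ definition above) =====
theorem get_size_range_py_spec : Claim_equal_get_size_range_py := by
  intro size _
  exact pv_main size
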